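-- pv_equiv track=rewrite | github.com/Zelong-Chen/Data-Mining-Map-Reduce | Assignment4/task1.py | find_edge_pairs
-- ===== SOURCE A (Python) =====
-- def find_edge_pairs(x, dictionary, thresh):
--     res = []
--     for item, value in dictionary.items():
--         if x != item:
--             bus_list_1 = dictionary[x]
--             bus_list_2 = dictionary[item]
--             inter = set(bus_list_1).intersection(set(bus_list_2))
--             if len(inter) >= thresh:
--                 res.append(item)
--     return (x, res)
-- ===== SOURCE B (Python) =====
-- def find_edge_pairs(x, dictionary, thresh):
--     # Element-major (inverted) counting: for each distinct element of x's list,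
--     # bump the count of every item whose list contains it, then threshold.
--     counts = dict.fromkeys(dictionary, 0)
--     for e in set(dictionary[x]):
--         for item, value in dictionary.items():
--             if e in value:
--                 counts[item] += 1
--     return (x, [item for item in dictionary if item != x and counts[item] >= thresh])
-- ===== Notes on version B (the rewrite author's own statement) =====
-- stated objective: alternative
-- what changed: B inverts the traversal: instead of A's item-major loop computing a set intersection per item, B iterates over the distinct elements of dictionary[x] and bumps a per-item counter for every item whose list contains that element, then thresholds the counters; Pre_ excludes assoc lists with duplicate keys (no Python dict has them) and inputs where x is not a key, where A raises KeyError except on the empty dictionary, the one such input where A still returns (x, []) while B's unconditional dictionary[x] lookup raises.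
-- outside the precondition, e.g. on find_edge_pairs('a', {}, 0): A returns ('a', []), B raises KeyError
import Mathlib
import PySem

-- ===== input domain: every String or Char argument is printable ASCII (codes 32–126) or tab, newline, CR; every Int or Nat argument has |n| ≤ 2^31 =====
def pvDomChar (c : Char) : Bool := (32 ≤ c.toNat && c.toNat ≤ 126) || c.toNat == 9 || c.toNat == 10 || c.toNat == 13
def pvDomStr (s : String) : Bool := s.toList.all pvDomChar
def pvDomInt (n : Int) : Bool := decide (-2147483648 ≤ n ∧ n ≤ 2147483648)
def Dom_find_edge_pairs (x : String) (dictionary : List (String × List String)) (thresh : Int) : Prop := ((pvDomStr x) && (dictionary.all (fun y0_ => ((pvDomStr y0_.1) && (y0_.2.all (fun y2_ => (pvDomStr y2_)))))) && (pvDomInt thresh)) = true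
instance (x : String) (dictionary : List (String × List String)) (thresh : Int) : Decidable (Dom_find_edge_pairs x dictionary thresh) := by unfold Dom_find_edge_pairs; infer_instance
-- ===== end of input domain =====

-- B inverts the traversal: element-major counting over the distinct elements of dictionary[x]
-- instead of A's per-item set intersections (alternative decomposition, not claimed faster).

-- ===== PORT A =====
def find_edge_pairs (x : String) (dictionary : List (String × List String)) (thresh : Int) : String × List String :=
  (x, dictionary.foldl (fun res p =>
        if x ≠ p.1 then
          let bus_list_1 := ((PySem.Dict.mk dictionary).get? x).getD []
          let bus_list_2 := ((PySem.Dict.mk dictionary).get? p.1).getD []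
          let inter := PySem.Set.inter (PySem.Set.ofList bus_list_1) (PySem.Set.ofList bus_list_2)
          if thresh ≤ PySem.Set.len inter then res ++ [p.1] else res
        else res) [])

-- ===== PORT B =====
def find_edge_pairs_alt (x : String) (dictionary : List (String × List String)) (thresh : Int) : String × List String :=
  let counts0 : PySem.Dict String Int :=
    dictionary.foldl (fun d p => d.insert p.1 0) PySem.Dict.empty
  let counts : PySem.Dict String Int :=
    (PySem.Set.ofList (((PySem.Dict.mk dictionary).get? x).getD [])).foldl
      (fun c e => dictionary.foldl
        (fun c p => if p.2.contains e then c.modify p.1 0 (· + 1) else c) c) counts0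
  (x, (dictionary.filter (fun p => p.1 != x && decide (thresh ≤ counts.getD p.1 0))).map (·.1))

-- ===== PRECONDITION & SPEC =====
-- Pre_ excludes assoc lists with duplicate keys (no Python dict has them) and inputs where x is
-- not a key: there A raises KeyError, except on the empty dictionary — the one such input where
-- A still returns (x, []) while B's unconditional dictionary[x] lookup raises.
def Pre_find_edge_pairs (x : String) (dictionary : List (String × List String)) (thresh : Int) : Prop :=
  (dictionary.map Prod.fst).Nodup ∧ x ∈ dictionary.map Prod.fst
instance (x : String) (dictionary : List (String × List String)) (thresh : Int) : Decidable (Pre_find_edge_pairs x dictionary thresh) := by unfold Pre_find_edge_pairs; infer_instance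

def pvWitness_find_edge_pairs : String × (List (String × List String)) × Int :=
  ("a", [("a", ["u", "v"]), ("b", ["v", "w"])], 1)

def Spec_find_edge_pairs (x : String) (dictionary : List (String × List String)) (thresh : Int) (out : String × List String) : Prop := out = find_edge_pairs_alt x dictionary thresh
instance (x : String) (dictionary : List (String × List String)) (thresh : Int) (out : String × List String) : Decidable (Spec_find_edge_pairs x dictionary thresh out) := by unfold Spec_find_edge_pairs; infer_instance

-- ===== CLAIM (what is proved, stated in full; the proofs are below) =====
def Claim_equal_find_edge_pairs : Prop := ∀ (x : String) (dictionary : List (String × List String)) (thresh : Int), Dom_find_edge_pairs x dictionary thresh → Pre_find_edge_pairs x dictionary thresh → Spec_find_edge_pairs x dictionary thresh (find_edge_pairs x dictionary thresh)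

-- ===== LEMMAS AND PROOFS =====

-- first-match lookup of a member key, when keys are unique
lemma get?_mk_of_mem {ν : Type} (l : List (String × ν)) (p : String × ν) :
    (l.map Prod.fst).Nodup → p ∈ l → (PySem.Dict.mk l).get? p.1 = some p.2 := by
  induction l with
  | nil => intro _ hp; cases hp
  | cons q t ih =>
    intro hnd hp
    simp only [List.map_cons, List.nodup_cons] at hnd
    rw [show PySem.Dict.mk (q :: t) = PySem.Dict.mk ((q.1, q.2) :: t) by simp,
      PySem.Dict.get?_mk_cons]
    rcases List.mem_cons.mp hp with hp | hp
    · simp [hp]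
    · have hne : q.1 ≠ p.1 := by
        intro h
        exact hnd.1 (h ▸ List.mem_map_of_mem hp)
      simp only [beq_iff_eq, hne, if_neg, not_false_eq_true]
      exact ih hnd.2 hp

-- dict.fromkeys(dictionary, 0) assigns 0 everywhere (getD with default 0 is 0 at every key)
lemma fromkeys_getD (l : List (String × List String)) (d : PySem.Dict String Int)
    (h : ∀ k, d.getD k 0 = 0) (k : String) :
    (l.foldl (fun d p => d.insert p.1 0) d).getD k 0 = 0 := by
  induction l generalizing d with
  | nil => exact h k
  | cons q t ih =>
    simp only [List.foldl_cons]
    refine ih _ (fun k' => ?_)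
    rw [PySem.Dict.getD_insert]
    split_ifs with hk
    · rfl
    · exact h k'

-- one element pass leaves keys that occur nowhere in the list alone
lemma inner_getD_not_mem (e k : String) (l : List (String × List String))
    (h : k ∉ l.map Prod.fst) (d : PySem.Dict String Int) :
    (l.foldl (fun c q => if q.2.contains e then c.modify q.1 0 (· + 1) else c) d).getD k 0
      = d.getD k 0 := by
  induction l generalizing d with
  | nil => rfl
  | cons q t ih =>
    simp only [List.map_cons, List.mem_cons, not_or] at h
    simp only [List.foldl_cons]
    by_cases hq : q.2.contains e
    · simp only [hq, if_pos]
      rw [ih h.2, PySem.Dict.getD_modify_of_ne _ _ _ h.1]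
    · simp only [hq, Bool.false_eq_true, if_neg, not_false_eq_true]
      exact ih h.2 d

-- one element pass: the count of a member key gains 1 iff its list contains e
lemma inner_getD_mem (e : String) (l : List (String × List String))
    (p : String × List String) (hp : p ∈ l) (hnd : (l.map Prod.fst).Nodup)
    (d : PySem.Dict String Int) :
    (l.foldl (fun c q => if q.2.contains e then c.modify q.1 0 (· + 1) else c) d).getD p.1 0
      = d.getD p.1 0 + (if p.2.contains e then 1 else 0) := by
  induction l generalizing d with
  | nil => cases hp
  | cons q t ih =>
    simp only [List.map_cons, List.nodup_cons] at hnd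
    simp only [List.foldl_cons]
    rcases List.mem_cons.mp hp with hp | hp
    · subst hp
      by_cases hc : p.2.contains e
      · simp only [hc, if_pos]
        rw [inner_getD_not_mem e p.1 t hnd.1, PySem.Dict.getD_modify_self]
      · simp only [hc, Bool.false_eq_true, if_neg, not_false_eq_true, add_zero]
        exact inner_getD_not_mem e p.1 t hnd.1 d
    · have hne : p.1 ≠ q.1 := fun h => hnd.1 (h ▸ List.mem_map_of_mem hp)
      by_cases hq : q.2.contains e
      · simp only [hq, if_pos]
        rw [ih hp hnd.2, PySem.Dict.getD_modify_of_ne _ _ _ hne]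
      · simp only [hq, Bool.false_eq_true, if_neg, not_false_eq_true]
        exact ih hp hnd.2 d

-- all element passes: the final count of a member key is the number of elements of es its list contains
lemma outer_getD_mem (es : List String) (l : List (String × List String))
    (p : String × List String) (hp : p ∈ l) (hnd : (l.map Prod.fst).Nodup)
    (d : PySem.Dict String Int) :
    (es.foldl (fun c e => l.foldl
        (fun c q => if q.2.contains e then c.modify q.1 0 (· + 1) else c) c) d).getD p.1 0
      = d.getD p.1 0 + ((es.filter (fun e => p.2.contains e)).length : Int) := by
  induction es generalizing d with
  | nil => simp
  | cons e t ih =>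
    simp only [List.foldl_cons]
    rw [ih, inner_getD_mem e l p hp hnd d, List.filter_cons]
    by_cases hc : p.2.contains e
    · simp only [hc, if_pos, List.length_cons]
      push_cast
      ring
    · simp only [hc, Bool.false_eq_true, if_neg, not_false_eq_true, add_zero]

-- |set(a) ∩ set(b)| = number of distinct elements of a that the list b contains
lemma inter_len_eq (a b : List String) :
    PySem.Set.len (PySem.Set.inter (PySem.Set.ofList a) (PySem.Set.ofList b))
      = (((PySem.Set.ofList a).filter (fun e => b.contains e)).length : Int) := by
  simp only [PySem.Set.len, PySem.Set.inter]
  congr 2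
  apply List.filter_congr
  intro e _
  simp [PySem.Set.mem_ofList]

-- ===== VERDICT (by name: the statement is the Claim_ definition above) =====
theorem find_edge_pairs_spec : Claim_equal_find_edge_pairs := by
  intro x dictionary thresh _ hpre
  obtain ⟨hnd, hx⟩ := hpre
  unfold Spec_find_edge_pairs find_edge_pairs find_edge_pairs_alt
  refine congrArg (Prod.mk x) ?_
  -- A's loop is an append-if loop
  rw [show (fun (res : List String) (p : String × List String) =>
        if x ≠ p.1 then
          let bus_list_1 := ((PySem.Dict.mk dictionary).get? x).getD []
          let bus_list_2 := ((PySem.Dict.mk dictionary).get? p.1).getD []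
          let inter := PySem.Set.inter (PySem.Set.ofList bus_list_1) (PySem.Set.ofList bus_list_2)
          if thresh ≤ PySem.Set.len inter then res ++ [p.1] else res
        else res)
      = (fun res p =>
          if (decide (x ≠ p.1) && decide (thresh ≤ PySem.Set.len (PySem.Set.inter
              (PySem.Set.ofList (((PySem.Dict.mk dictionary).get? x).getD []))
              (PySem.Set.ofList (((PySem.Dict.mk dictionary).get? p.1).getD []))))) = true
          then res ++ [p.1] else res) from by
      funext res p
      by_cases h1 : x ≠ p.1 <;> by_cases h2 : thresh ≤ PySem.Set.len (PySem.Set.inter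
          (PySem.Set.ofList (((PySem.Dict.mk dictionary).get? x).getD []))
          (PySem.Set.ofList (((PySem.Dict.mk dictionary).get? p.1).getD []))) <;>
        first | simp [h1, h2] | simp [h1]]
  rw [PySem.List.foldl_append_if, List.nil_append]
  congr 1
  apply List.filter_congr
  intro p hp
  by_cases hpx : p.1 = x
  · simp [hpx]
  · have hlookp : (PySem.Dict.mk dictionary).get? p.1 = some p.2 := get?_mk_of_mem dictionary p hnd hp
    have hcount := outer_getD_mem
      (PySem.Set.ofList (((PySem.Dict.mk dictionary).get? x).getD []))
      dictionary p hp hnd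
      (dictionary.foldl (fun d q => d.insert q.1 0) PySem.Dict.empty)
    rw [fromkeys_getD dictionary PySem.Dict.empty (fun _ => rfl) p.1, zero_add] at hcount
    rw [hcount]
    rw [show ((PySem.Dict.mk dictionary).get? p.1).getD [] = p.2 from by rw [hlookp]; rfl]
    rw [inter_len_eq]
    have h1 : x ≠ p.1 := fun h => hpx h.symm
    simp [h1, hpx, bne]
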